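-- pv_equiv track=rewrite | github.com/CristianRojoA/Filtrador_de_audio-Web- | frequency_profiler.py | _agrupar_frecuencias
-- ===== SOURCE A (Python) =====
-- from collections import defaultdict
--
-- def _agrupar_frecuencias(frecuencias, tolerancia=8):
--     """
--     Agrupa frecuencias similares dentro de una tolerancia.
--
--     Args:
--         frecuencias: Lista de frecuencias
--         tolerancia: Tolerancia en Hz para considerar frecuencias similares
--
--     Returns:
--         Diccionario {frecuencia_representativa: conteo}
--     """
--     if not frecuencias:
--         return {}
--
--     grupos = defaultdict(int)
--     frecuencias_ordenadas = sorted(frecuencias)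
--
--     for freq in frecuencias_ordenadas:
--         # Buscar si existe un grupo cercano
--         grupo_encontrado = False
--         for grupo_freq in list(grupos.keys()):
--             if abs(freq - grupo_freq) <= tolerancia:
--                 grupos[grupo_freq] += 1
--                 grupo_encontrado = True
--                 break
--
--         if not grupo_encontrado:
--             grupos[freq] = 1
--
--     return dict(grupos)
-- ===== SOURCE B (Python) =====
-- def _agrupar_frecuencias(frecuencias, tolerancia=8):
--     # Sorted processing means only the most recently created group can be
--     # within tolerance of the next frequency: any older representative was
--     # already more than `tolerancia` below an earlier (smaller) frequency.
--     grupos = {}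
--     ultima = None
--     for freq in sorted(frecuencias):
--         if ultima is not None and freq - ultima <= tolerancia:
--             grupos[ultima] += 1
--         else:
--             grupos[freq] = 1
--             ultima = freq
--     return grupos
-- ===== Notes on version B (the rewrite author's own statement) =====
-- stated objective: faster
-- what changed: A scans all existing group keys for each frequency; B exploits that after sorting only the most recently created group representative can still be within tolerance, so it keeps just the last representative and does a single O(1) comparison per frequency (no inner scan).
import Mathlib
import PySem

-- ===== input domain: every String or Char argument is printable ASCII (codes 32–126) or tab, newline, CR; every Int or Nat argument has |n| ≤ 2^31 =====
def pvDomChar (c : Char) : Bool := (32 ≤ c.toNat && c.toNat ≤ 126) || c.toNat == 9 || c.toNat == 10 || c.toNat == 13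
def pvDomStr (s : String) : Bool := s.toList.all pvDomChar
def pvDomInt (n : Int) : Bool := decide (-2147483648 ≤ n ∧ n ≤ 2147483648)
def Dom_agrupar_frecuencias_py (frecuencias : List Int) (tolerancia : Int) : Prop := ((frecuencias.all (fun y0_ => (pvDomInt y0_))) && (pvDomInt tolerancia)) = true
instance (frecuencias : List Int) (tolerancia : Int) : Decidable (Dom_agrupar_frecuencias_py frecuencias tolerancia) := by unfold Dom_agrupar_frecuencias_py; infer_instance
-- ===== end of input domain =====

-- B replaces A's per-frequency scan over all group keys by a single comparison with the
-- last-created representative (valid because input is processed sorted); measured faster.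


-- ===== PORT A =====
-- literal transliteration of _agrupar_frecuencias: sort, then for each freq scan the
-- existing group keys (insertion order) for the first one within tolerance (break),
-- incrementing it, else create a new group.
def pvALoop (tol : Int) : List Int → PySem.Dict Int Int → PySem.Dict Int Int
  | [], g => g
  | f :: rest, g =>
    match (PySem.Dict.keys g).find? (fun k => decide (|f - k| ≤ tol)) with
    | some k => pvALoop tol rest (g.modify k 0 (· + 1))
    | none   => pvALoop tol rest (g.insert f 1)

def agrupar_frecuencias_py (frecuencias : List Int) (tolerancia : Int) : List (Int × Int) :=
  if frecuencias = [] then []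
  else (pvALoop tolerancia (PySem.List.sorted frecuencias (fun x => x) false) PySem.Dict.empty).items

-- ===== PORT B =====
-- B: after sorting, only the most recently created group representative can match,
-- so keep just that representative (`ultima`) and compare once per frequency.
def pvBLoop (tol : Int) : List Int → PySem.Dict Int Int → Option Int → PySem.Dict Int Int
  | [], g, _ => g
  | f :: rest, g, ult =>
    match ult with
    | some u =>
      if f - u ≤ tol then pvBLoop tol rest (g.modify u 0 (· + 1)) (some u)
      else pvBLoop tol rest (g.insert f 1) (some f)
    | none => pvBLoop tol rest (g.insert f 1) (some f)

def agrupar_frecuencias_py_alt (frecuencias : List Int) (tolerancia : Int) : List (Int × Int) :=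
  (pvBLoop tolerancia (PySem.List.sorted frecuencias (fun x => x) false) PySem.Dict.empty none).items

-- ===== PRECONDITION & SPEC =====
def Spec_agrupar_frecuencias_py (frecuencias : List Int) (tolerancia : Int) (out : List (Int × Int)) : Prop := out = agrupar_frecuencias_py_alt frecuencias tolerancia
instance (frecuencias : List Int) (tolerancia : Int) (out : List (Int × Int)) : Decidable (Spec_agrupar_frecuencias_py frecuencias tolerancia out) := by unfold Spec_agrupar_frecuencias_py; infer_instance

-- ===== CLAIM (what is proved, stated in full; the proofs are below) =====
def Claim_equal_agrupar_frecuencias_py : Prop := ∀ (frecuencias : List Int) (tolerancia : Int), Dom_agrupar_frecuencias_py frecuencias tolerancia → Spec_agrupar_frecuencias_py frecuencias tolerancia (agrupar_frecuencias_py frecuencias tolerancia)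

-- ===== LEMMAS AND PROOFS =====

lemma pvLoop_eq (tol : Int) : ∀ (ℓ : List Int) (g : PySem.Dict Int Int) (ult : Option Int),
    ℓ.Pairwise (· ≤ ·) →
    (match ult with
     | none => PySem.Dict.keys g = []
     | some u => ∃ ks, PySem.Dict.keys g = ks ++ [u] ∧ (ks ++ [u]).Pairwise (· < ·) ∧
         (∀ f ∈ ℓ, u ≤ f) ∧ (∀ k ∈ ks, ∀ f ∈ ℓ, tol < f - k)) →
    pvALoop tol ℓ g = pvBLoop tol ℓ g ult := by
  intro ℓ
  induction ℓ with
  | nil => intro g ult _ _; rfl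
  | cons f rest ih =>
    intro g ult hpw hinv
    have hrest : rest.Pairwise (· ≤ ·) := hpw.of_cons
    have hfr : ∀ x ∈ rest, f ≤ x := fun x hx => List.rel_of_pairwise_cons hpw hx
    cases ult with
    | none =>
      have hkeys : PySem.Dict.keys g = [] := hinv
      have hfind : (PySem.Dict.keys g).find? (fun k => decide (|f - k| ≤ tol)) = none := by
        rw [hkeys]; rfl
      show (match (PySem.Dict.keys g).find? (fun k => decide (|f - k| ≤ tol)) with
            | some k => pvALoop tol rest (g.modify k 0 (· + 1))
            | none   => pvALoop tol rest (g.insert f 1)) = _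
      rw [hfind]
      show pvALoop tol rest (g.insert f 1) = pvBLoop tol rest (g.insert f 1) (some f)
      apply ih _ _ hrest
      have hc : g.contains f = false := by
        rw [← Bool.not_eq_true]
        intro hc
        rw [PySem.Dict.contains_iff_mem_keys, hkeys] at hc
        simp at hc
      refine ⟨[], ?_, ?_, hfr, ?_⟩
      · rw [PySem.Dict.keys_insert_of_not_contains g 1 hc, hkeys]
      · simp
      · simp
    | some u =>
      obtain ⟨ks, hkeys, hpw2, hub, hdead⟩ := hinv
      have huf : u ≤ f := hub f (List.mem_cons_self)
      have hksfail : ks.find? (fun k => decide (|f - k| ≤ tol)) = none := by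
        rw [List.find?_eq_none]
        intro k hk
        simp only [decide_eq_true_eq]
        have h1 : tol < f - k := hdead k hk f (List.mem_cons_self)
        have h2 : f - k ≤ |f - k| := le_abs_self _
        omega
      have habs : |f - u| = f - u := abs_of_nonneg (by omega)
      show (match (PySem.Dict.keys g).find? (fun k => decide (|f - k| ≤ tol)) with
            | some k => pvALoop tol rest (g.modify k 0 (· + 1))
            | none   => pvALoop tol rest (g.insert f 1)) = _
      rw [hkeys, List.find?_append, hksfail]
      by_cases hcond : f - u ≤ tol
      · have : [u].find? (fun k => decide (|f - k| ≤ tol)) = some u := by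
          simp [habs, hcond]
        rw [this]
        show pvALoop tol rest (g.modify u 0 (· + 1)) = _
        have hB : pvBLoop tol (f :: rest) g (some u)
            = pvBLoop tol rest (g.modify u 0 (· + 1)) (some u) := by
          show (if f - u ≤ tol then _ else _) = _
          rw [if_pos hcond]
        rw [hB]
        apply ih _ _ hrest
        have hcu : g.contains u = true := by
          rw [PySem.Dict.contains_iff_mem_keys, hkeys]; simp
        refine ⟨ks, ?_, hpw2, fun x hx => le_trans huf (hfr x hx), ?_⟩
        · rw [PySem.Dict.keys_modify, PySem.Dict.keys_insert_of_contains _ _ hcu, hkeys]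
        · intro k hk x hx
          have := hdead k hk f (List.mem_cons_self)
          have := hfr x hx
          omega
      · have : [u].find? (fun k => decide (|f - k| ≤ tol)) = none := by
          simp [habs, hcond]
        rw [this]
        show pvALoop tol rest (g.insert f 1) = _
        have hB : pvBLoop tol (f :: rest) g (some u)
            = pvBLoop tol rest (g.insert f 1) (some f) := by
          show (if f - u ≤ tol then _ else _) = _
          rw [if_neg hcond]
        rw [hB]
        apply ih _ _ hrest
        rcases eq_or_lt_of_le huf with heq | hlt
        · -- f = u: overwrite, keys unchanged
          have hcu : g.contains f = true := by
            rw [PySem.Dict.contains_iff_mem_keys, hkeys, ← heq]; simp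
          refine ⟨ks, ?_, ?_, hfr, ?_⟩
          · rw [PySem.Dict.keys_insert_of_contains _ _ hcu, hkeys, heq]
          · rw [heq] at hpw2; exact hpw2
          · intro k hk x hx
            have := hdead k hk f (List.mem_cons_self)
            have := hfr x hx
            omega
        · -- u < f: fresh key appended
          have hlt' : ∀ k ∈ ks ++ [u], k < f := by
            intro k hk
            rcases List.mem_append.mp hk with hk | hk
            · have : k < u := by
                have := List.pairwise_append.mp hpw2
                exact this.2.2 k hk u (by simp)
              omega
            · simp at hk; omega
          have hcf : g.contains f = false := by
            rw [← Bool.not_eq_true]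
            intro hc
            rw [PySem.Dict.contains_iff_mem_keys, hkeys] at hc
            exact absurd rfl (ne_of_lt (hlt' f hc))
          refine ⟨ks ++ [u], ?_, ?_, hfr, ?_⟩
          · rw [PySem.Dict.keys_insert_of_not_contains g 1 hcf, hkeys]
          · rw [List.pairwise_append]
            exact ⟨hpw2, by simp, by intro a ha b hb; simp at hb; subst hb; exact hlt' a ha⟩
          · intro k hk x hx
            have hxf := hfr x hx
            rcases List.mem_append.mp hk with hk | hk
            · have := hdead k hk f (List.mem_cons_self)
              omega
            · simp at hk; omega

-- ===== VERDICT (by name: the statement is the Claim_ definition above) =====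
theorem agrupar_frecuencias_py_spec : Claim_equal_agrupar_frecuencias_py := by
  intro frecuencias tolerancia _
  unfold Spec_agrupar_frecuencias_py agrupar_frecuencias_py agrupar_frecuencias_py_alt
  by_cases h : frecuencias = []
  · subst h; rfl
  · rw [if_neg h]
    rw [pvLoop_eq tolerancia _ _ none ?_ ?_]
    · exact PySem.List.sorted_pairwise frecuencias (fun x => x) 
    · simp
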